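-- pv_equiv track=rewrite | github.com/dwighthubbard/SimpleSolidPy | SimpleSolidPy/openscad.py | make_one_function_per_line
-- ===== SOURCE A (Python) =====
-- def make_one_function_per_line(openscad_script):
--     result = ''
--     for line in openscad_script.split('\n'):
--         temp = line.split(')')
--         if len(temp) > 1:
--             # Got multiple functions on a line
--             new_line = ''
--             looking_for_next = False
--             for c in line:
--                 if c == ')':
--                     if looking_for_next:
--                         new_line += ')\n}'
--                     else:
--                         new_line += ')\n{'
--                     looking_for_next = True
--                 else:
--                     new_line += c
--             line = new_line
--
--         line = line.replace(')', ')\n')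
--         result += line.rstrip('\n') + '\n'
--     return result
-- ===== SOURCE B (Python) =====
-- def make_one_function_per_line(openscad_script):
--     out = []
--     for line in openscad_script.split('\n'):
--         parts = line.split(')')
--         if len(parts) == 1:
--             out.append(line)
--         else:
--             pieces = [parts[0], ')\n\n{', parts[1]]
--             for p in parts[2:]:
--                 pieces.append(')\n\n}')
--                 pieces.append(p)
--             out.append(''.join(pieces))
--     return '\n'.join(out) + '\n'
-- ===== Notes on version B (the rewrite author's own statement) =====
-- stated objective: simpler
-- what changed: Replaces A's flag-driven per-character state machine plus a second replace() pass with a single split(')') and a join that inserts ')\n\n{' after the first segment and ')\n\n}' after each later one, building the result with '\n'.join instead of string accumulation.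
import Mathlib
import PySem

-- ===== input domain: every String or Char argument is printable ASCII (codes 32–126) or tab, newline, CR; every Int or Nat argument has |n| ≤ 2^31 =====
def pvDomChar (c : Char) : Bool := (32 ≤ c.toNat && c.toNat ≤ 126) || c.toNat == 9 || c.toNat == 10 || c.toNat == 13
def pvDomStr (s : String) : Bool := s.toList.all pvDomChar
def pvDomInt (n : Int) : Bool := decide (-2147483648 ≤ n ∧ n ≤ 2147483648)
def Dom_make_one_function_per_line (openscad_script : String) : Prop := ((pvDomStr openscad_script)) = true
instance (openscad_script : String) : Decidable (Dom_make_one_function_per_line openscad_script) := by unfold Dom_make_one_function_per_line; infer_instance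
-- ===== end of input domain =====

-- B replaces A's flag-driven character scan plus the later replace() by a single split(')')
-- and a join that inserts ')\n\n{' after the first segment and ')\n\n}' after the others
-- (objective: simpler — no per-character state machine, no second replace pass).

-- ===== PORT A =====
-- Python's line.rstrip('\n') (PySem.Chars has no right-strip with a chars argument);
-- exact: drops exactly the trailing '\n' characters.
def pvRstripNl (cs : List Char) : List Char :=
  (cs.reverse.dropWhile (fun c => c = '\n')).reverse

-- A's inner character loop: state = (new_line, looking_for_next)
def pvAInner (line : List Char) : List Char × Bool :=
  line.foldl
    (fun st c =>
      if c = ')' then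
        (st.1 ++ (if st.2 then [')', '\n', '}'] else [')', '\n', '{']), true)
      else (st.1 ++ [c], st.2))
    ([], false)

-- A's loop body: split-test, optional rebuild, replace, rstrip, append newline
def pvALine (line : List Char) : List Char :=
  pvRstripNl
    (PySem.Chars.replace
      (if (PySem.Chars.splitOn line [')']).length > 1 then (pvAInner line).1 else line)
      [')'] [')', '\n']) ++ ['\n']

def make_one_function_per_line (openscad_script : String) : String :=
  String.ofList
    ((PySem.Chars.splitOn openscad_script.toList ['\n']).foldl
      (fun result line => result ++ pvALine line) [])

-- ===== PORT B =====
-- B's loop body: split on ')' and glue with ')\n\n{' / ')\n\n}'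
def pvBLine (line : List Char) : List Char :=
  match PySem.Chars.splitOn line [')'] with
  | p0 :: p1 :: rest =>
      p0 ++ [')', '\n', '\n', '{'] ++ p1 ++
        rest.foldl (fun acc p => acc ++ [')', '\n', '\n', '}'] ++ p) []
  | _ => line

def make_one_function_per_line_alt (openscad_script : String) : String :=
  String.ofList
    (PySem.Chars.join ['\n']
      ((PySem.Chars.splitOn openscad_script.toList ['\n']).map pvBLine) ++ ['\n'])

-- ===== PRECONDITION & SPEC =====
def Spec_make_one_function_per_line (openscad_script : String) (out : String) : Prop := out = make_one_function_per_line_alt openscad_script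
instance (openscad_script : String) (out : String) : Decidable (Spec_make_one_function_per_line openscad_script out) := by unfold Spec_make_one_function_per_line; infer_instance

-- ===== CLAIM (what is proved, stated in full; the proofs are below) =====
def Claim_equal_make_one_function_per_line : Prop := ∀ (openscad_script : String), Dom_make_one_function_per_line openscad_script → Spec_make_one_function_per_line openscad_script (make_one_function_per_line openscad_script)

-- ===== LEMMAS AND PROOFS =====

-- Structural characterisation of str.split(c₀) for a one-character separator
def pvSplitC (c₀ : Char) : List Char → List (List Char)
  | [] => [[]]
  | c :: cs =>
    if c = c₀ then [] :: pvSplitC c₀ cs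
    else
      match pvSplitC c₀ cs with
      | p :: ps => (c :: p) :: ps
      | [] => [[c]]

def pvConsHead (pre : List Char) : List (List Char) → List (List Char)
  | [] => [pre]
  | p :: ps => (pre ++ p) :: ps

lemma pvSplitC_ne_nil (c₀ : Char) (cs : List Char) : pvSplitC c₀ cs ≠ [] := by
  induction cs with
  | nil => simp [pvSplitC]
  | cons c cs ih =>
    unfold pvSplitC
    split
    · simp
    · rcases h : pvSplitC c₀ cs with _ | ⟨p, ps⟩ <;> simp

lemma pvSplitOn_go_spec (c₀ : Char) (l : List Char) :
    ∀ (fuel : Nat) (cur : List Char) (acc : List (List Char)), l.length ≤ fuel →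
      PySem.Chars.splitOn.go [c₀] fuel l cur acc
        = acc.reverse ++ pvConsHead cur.reverse (pvSplitC c₀ l) := by
  induction l with
  | nil =>
    intro fuel cur acc h
    cases fuel with
    | zero => simp [PySem.Chars.splitOn.go, pvSplitC, pvConsHead]
    | succ f => simp [PySem.Chars.splitOn.go, pvSplitC, pvConsHead]
  | cons c rest ih =>
    intro fuel cur acc h
    cases fuel with
    | zero => simp at h
    | succ f =>
      rw [PySem.Chars.splitOn.go]
      have hpre : [c₀].isPrefixOf (c :: rest) = (c₀ == c) := by simp [List.isPrefixOf]
      rw [hpre]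
      simp only [List.length_cons] at h
      by_cases hc : c = c₀
      · subst hc
        rw [if_pos (by simp)]
        simp only [List.length_singleton, List.drop_one, List.tail_cons]
        rw [ih f [] (cur.reverse :: acc) (Nat.le_of_succ_le_succ h)]
        rcases hS : pvSplitC c rest with _ | ⟨p, ps⟩
        · exact absurd hS (pvSplitC_ne_nil c rest)
        · simp [pvSplitC, pvConsHead, hS]
      · rw [if_neg (by simp; exact fun e => hc e.symm)]
        rw [ih f (c :: cur) acc (Nat.le_of_succ_le_succ h)]
        rcases hS : pvSplitC c₀ rest with _ | ⟨p, ps⟩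
        · exact absurd hS (pvSplitC_ne_nil c₀ rest)
        · simp [pvSplitC, pvConsHead, hc, hS]

lemma pvSplitOn_eq (c₀ : Char) (cs : List Char) :
    PySem.Chars.splitOn cs [c₀] = pvSplitC c₀ cs := by
  unfold PySem.Chars.splitOn
  rw [pvSplitOn_go_spec c₀ cs (cs.length + 1) [] [] (by omega)]
  rcases h : pvSplitC c₀ cs with _ | ⟨p, ps⟩
  · exact absurd h (pvSplitC_ne_nil c₀ cs)
  · simp [pvConsHead]

-- Structural characterisation of A's line.replace(')', ')\n')
def pvRep : List Char → List Char
  | [] => []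
  | c :: cs => if c = ')' then ')' :: '\n' :: pvRep cs else c :: pvRep cs

lemma pvReplace_go_spec (l : List Char) :
    ∀ (fuel : Nat) (acc : List Char), l.length ≤ fuel →
      PySem.Chars.replace.go [')'] [')', '\n'] fuel l acc = acc.reverse ++ pvRep l := by
  induction l with
  | nil =>
    intro fuel acc h
    cases fuel <;> simp [PySem.Chars.replace.go, pvRep]
  | cons c rest ih =>
    intro fuel acc h
    cases fuel with
    | zero => simp at h
    | succ f =>
      rw [PySem.Chars.replace.go]
      have hpre : [')'].isPrefixOf (c :: rest) = (')' == c) := by simp [List.isPrefixOf]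
      rw [hpre]
      simp only [List.length_cons] at h
      by_cases hc : c = ')'
      · subst hc
        rw [if_pos (by simp)]
        simp only [List.length_singleton, List.drop_one, List.tail_cons]
        rw [ih f _ (Nat.le_of_succ_le_succ h)]
        simp [pvRep]
      · rw [if_neg (by simp; exact fun e => hc e.symm)]
        rw [ih f _ (Nat.le_of_succ_le_succ h)]
        simp [pvRep, hc]

lemma pvReplace_eq (cs : List Char) :
    PySem.Chars.replace cs [')'] [')', '\n'] = pvRep cs := by
  unfold PySem.Chars.replace
  rw [if_neg (by simp)]
  rw [pvReplace_go_spec cs cs.length [] (by omega)]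
  simp

-- A's flag loop, structurally
def pvT (flag : Bool) : List Char → List Char
  | [] => []
  | c :: cs =>
    if c = ')' then (if flag then [')', '\n', '}'] else [')', '\n', '{']) ++ pvT true cs
    else c :: pvT flag cs

lemma pvAInner_eq (cs : List Char) :
    ∀ (acc : List Char) (flag : Bool),
      (cs.foldl
        (fun st c =>
          if c = ')' then
            (st.1 ++ (if st.2 then [')', '\n', '}'] else [')', '\n', '{']), true)
          else (st.1 ++ [c], st.2))
        (acc, flag)).1 = acc ++ pvT flag cs := by
  induction cs with
  | nil => intro acc flag; simp [pvT]
  | cons c cs ih =>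
    intro acc flag
    by_cases hc : c = ')'
    · subst hc
      simp only [List.foldl_cons]
      rw [ih]
      cases flag <;> simp [pvT]
    · simp only [List.foldl_cons, if_neg hc]
      rw [ih]
      simp [pvT, hc]

-- A's combined effect on a line containing ')': flag loop then replace
def pvF (flag : Bool) : List Char → List Char
  | [] => []
  | c :: cs =>
    if c = ')' then [')', '\n', '\n', if flag then '}' else '{'] ++ pvF true cs
    else c :: pvF flag cs

lemma pvRep_pvT (cs : List Char) : ∀ flag, pvRep (pvT flag cs) = pvF flag cs := by
  induction cs with
  | nil => intro flag; simp [pvT, pvF, pvRep]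
  | cons c cs ih =>
    intro flag
    by_cases hc : c = ')'
    · subst hc
      cases flag <;> simp [pvT, pvF, pvRep, ih]
    · simp [pvT, pvF, pvRep, hc, ih]

lemma pvRep_of_not_mem (cs : List Char) (h : ')' ∉ cs) : pvRep cs = cs := by
  induction cs with
  | nil => simp [pvRep]
  | cons c cs ih =>
    have hc : c ≠ ')' := fun e => h (by simp [e])
    have hcs : ')' ∉ cs := fun hm => h (List.mem_cons_of_mem _ hm)
    simp [pvRep, hc, ih hcs]

lemma pvSplitC_of_not_mem (cs : List Char) (h : ')' ∉ cs) : pvSplitC ')' cs = [cs] := by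
  induction cs with
  | nil => simp [pvSplitC]
  | cons c cs ih =>
    have hc : c ≠ ')' := fun e => h (by simp [e])
    have hcs : ')' ∉ cs := fun hm => h (List.mem_cons_of_mem _ hm)
    simp [pvSplitC, hc, ih hcs]

-- B's glue over the tail segments
def pvGlueT : List (List Char) → List Char
  | [] => []
  | p :: ps => p ++ ps.foldl (fun acc q => acc ++ [')', '\n', '\n', '}'] ++ q) []

def pvGlueF : List (List Char) → Option (List Char)
  | p0 :: p1 :: rest => some (p0 ++ [')', '\n', '\n', '{'] ++ pvGlueT (p1 :: rest))
  | _ => none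

lemma pvFold_eq_flatMap (ps : List (List Char)) :
    ps.foldl (fun acc q => acc ++ [')', '\n', '\n', '}'] ++ q) []
      = ps.flatMap (fun q => [')', '\n', '\n', '}'] ++ q) := by
  rw [PySem.List.foldl_congr_mem ps _
      (fun acc q => acc ++ ([')', '\n', '\n', '}'] ++ q)) []
      (by intro acc x _; simp)]
  rw [PySem.List.foldl_append_eq_flatMap]
  simp [List.flatMap]

lemma pvGlueT_flatMap (p : List Char) (ps : List (List Char)) :
    pvGlueT (p :: ps) = p ++ ps.flatMap (fun q => [')', '\n', '\n', '}'] ++ q) := by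
  rw [pvGlueT, pvFold_eq_flatMap]

lemma pvGlueT_spec (cs : List Char) : pvGlueT (pvSplitC ')' cs) = pvF true cs := by
  induction cs with
  | nil => simp [pvSplitC, pvGlueT, pvF]
  | cons c cs ih =>
    by_cases hc : c = ')'
    · subst hc
      rcases hS : pvSplitC ')' cs with _ | ⟨q, qs⟩
      · exact absurd hS (pvSplitC_ne_nil ')' cs)
      · rw [hS] at ih
        simp [pvSplitC, hS, pvGlueT_flatMap, pvF, ← ih]
    · rcases hS : pvSplitC ')' cs with _ | ⟨q, qs⟩
      · exact absurd hS (pvSplitC_ne_nil ')' cs)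
      · rw [hS] at ih
        simp [pvSplitC, hc, hS, pvGlueT_flatMap, pvF, ← ih]

lemma pvGlueF_spec (cs : List Char) (h : ')' ∈ cs) :
    pvGlueF (pvSplitC ')' cs) = some (pvF false cs) := by
  induction cs with
  | nil => simp at h
  | cons c cs ih =>
    by_cases hc : c = ')'
    · subst hc
      rcases hS : pvSplitC ')' cs with _ | ⟨q, qs⟩
      · exact absurd hS (pvSplitC_ne_nil ')' cs)
      · have hT := pvGlueT_spec cs
        rw [hS] at hT
        simp [pvSplitC, hS, pvGlueF, pvF, hT]
    · have hmem : ')' ∈ cs := by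
        rcases List.mem_cons.mp h with e | hm
        · exact absurd e.symm hc
        · exact hm
      have hih := ih hmem
      rcases hS : pvSplitC ')' cs with _ | ⟨p0, ps⟩
      · exact absurd hS (pvSplitC_ne_nil ')' cs)
      rcases ps with _ | ⟨p1, rest⟩
      · rw [hS] at hih; simp [pvGlueF] at hih
      · rw [hS] at hih
        simp only [pvGlueF, Option.some.injEq] at hih
        simp [pvSplitC, hc, hS, pvGlueF, pvF, ← hih]

lemma pvRstripNl_concat (pre : List Char) (c : Char) (h : c ≠ '\n') :
    pvRstripNl (pre ++ [c]) = pre ++ [c] := by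
  simp [pvRstripNl, h]

lemma pvF_concat (cs : List Char) :
    ∀ flag, cs ≠ [] → '\n' ∉ cs → ∃ pre c, c ≠ '\n' ∧ pvF flag cs = pre ++ [c] := by
  induction cs with
  | nil => intro flag h; exact absurd rfl h
  | cons c cs ih =>
    intro flag _ hnl
    have hc' : c ≠ '\n' := fun e => hnl (by simp [e])
    have hnl' : '\n' ∉ cs := fun hm => hnl (List.mem_cons_of_mem _ hm)
    rcases eq_or_ne cs [] with rfl | hcs
    · by_cases hc : c = ')'
      · subst hc
        cases flag
        · exact ⟨[')', '\n', '\n'], '{', by decide, by simp [pvF]⟩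
        · exact ⟨[')', '\n', '\n'], '}', by decide, by simp [pvF]⟩
      · exact ⟨[], c, hc', by simp [pvF, hc]⟩
    · by_cases hc : c = ')'
      · subst hc
        obtain ⟨pre, d, hd, hF⟩ := ih true hcs hnl'
        exact ⟨[')', '\n', '\n', if flag then '}' else '{'] ++ pre, d, hd, by
          simp [pvF, hF]⟩
      · obtain ⟨pre, d, hd, hF⟩ := ih flag hcs hnl'
        exact ⟨c :: pre, d, hd, by simp [pvF, hc, hF]⟩

lemma pvSplitC_nl_not_mem (s : List Char) : ∀ p ∈ pvSplitC '\n' s, '\n' ∉ p := by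
  induction s with
  | nil =>
    intro p hp
    simp [pvSplitC] at hp
    simp [hp]
  | cons c s ih =>
    intro p hp
    by_cases hc : c = '\n'
    · subst hc
      rw [pvSplitC, if_pos rfl] at hp
      simp only [List.mem_cons] at hp
      rcases hp with rfl | hp
      · simp
      · exact ih p hp
    · obtain ⟨q, qs, hS⟩ := List.exists_cons_of_ne_nil (pvSplitC_ne_nil '\n' s)
      rw [pvSplitC, if_neg hc, hS] at hp
      simp only [List.mem_cons] at hp
      rcases hp with rfl | hp
      · have hq : '\n' ∉ q := ih q (hS ▸ List.mem_cons_self)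
        simp only [List.mem_cons]
        rintro (e | e)
        · exact hc e.symm
        · exact hq e
      · exact ih p (hS ▸ List.mem_cons_of_mem _ hp)

lemma pvLine_eq (l : List Char) (hl : '\n' ∉ l) : pvALine l = pvBLine l ++ ['\n'] := by
  unfold pvALine pvBLine
  rw [pvSplitOn_eq]
  by_cases h : ')' ∈ l
  · have hG := pvGlueF_spec l h
    rcases hS : pvSplitC ')' l with _ | ⟨p0, ps⟩
    · exact absurd hS (pvSplitC_ne_nil ')' l)
    rcases ps with _ | ⟨p1, rest⟩
    · rw [hS] at hG; simp [pvGlueF] at hG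
    · rw [hS] at hG
      simp only [pvGlueF, Option.some.injEq] at hG
      rw [if_pos (by simp)]
      have hInner : (pvAInner l).1 = pvT false l := by
        have := pvAInner_eq l [] false
        simpa [pvAInner] using this
      rw [hInner, pvReplace_eq, pvRep_pvT]
      obtain ⟨pre, c, hc, hF⟩ := pvF_concat l false (List.ne_nil_of_mem h) hl
      rw [hF, pvRstripNl_concat pre c hc, ← hF, ← hG]
      simp [pvGlueT_flatMap, List.flatMap]
  · have hS := pvSplitC_of_not_mem l h
    rw [hS]
    simp only [List.length_cons, List.length_nil]
    rw [if_neg (by omega)]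
    rw [pvReplace_eq, pvRep_of_not_mem l h]
    rcases List.eq_nil_or_concat l with rfl | ⟨pre, c, rfl⟩
    · simp [pvRstripNl]
    · have hc : c ≠ '\n' := fun e => hl (by simp [e])
      rw [List.concat_eq_append, pvRstripNl_concat pre c hc]

lemma pvJoin_newlines (ps : List (List Char)) (h : ps ≠ []) :
    ps.flatMap (fun p => p ++ ['\n']) = List.intercalate ['\n'] ps ++ ['\n'] := by
  induction ps with
  | nil => exact absurd rfl h
  | cons p ps ih =>
    cases ps with
    | nil => simp [List.intercalate]
    | cons q rest =>
      rw [List.flatMap_cons, ih (by simp)]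
      simp [List.intercalate, List.intersperse]

-- ===== VERDICT (by name: the statement is the Claim_ definition above) =====
theorem make_one_function_per_line_spec : Claim_equal_make_one_function_per_line := by
  intro s _
  unfold Spec_make_one_function_per_line
  unfold make_one_function_per_line make_one_function_per_line_alt
  rw [pvSplitOn_eq]
  rw [PySem.List.foldl_append_eq_flatMap pvALine (pvSplitC '\n' s.toList) []]
  have hcong : (pvSplitC '\n' s.toList).flatMap pvALine
      = (pvSplitC '\n' s.toList).flatMap (fun l => pvBLine l ++ ['\n']) := by
    simp only [List.flatMap]
    congr 1
    exact List.map_congr_left fun l hl => pvLine_eq l (pvSplitC_nl_not_mem s.toList l hl)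
  rw [hcong, ← List.flatMap_map pvBLine (fun p => p ++ ['\n'])]
  rw [pvJoin_newlines _ (by simp [pvSplitC_ne_nil '\n' s.toList])]
  simp [PySem.Chars.join]
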